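-- pv_equiv track=rewrite | github.com/AdamKrysztopa/dependence-forecastability | tests/test_run_extended_fingerprint_showcase.py | _count_unescaped_pipes
-- ===== SOURCE A (Python) =====
-- def _count_unescaped_pipes(line: str) -> int:
--     count = 0
--     escaped = False
--     for character in line:
--         if escaped:
--             escaped = False
--             continue
--         if character == "\\":
--             escaped = True
--             continue
--         if character == "|":
--             count += 1
--     return count
-- ===== SOURCE B (Python) =====
-- def _count_unescaped_pipes(line: str) -> int:
--     # Staged approach: split the line at backslashes, then count pipes per chunk.
--     # Each split boundary is a backslash escaping the first character of the next
--     # chunk; an empty chunk means that backslash escaped the following boundary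
--     # backslash, so the chunk after it is counted in full.
--     parts = line.split("\\")
--     total = parts[0].count("|")
--     i = 1
--     while i < len(parts):
--         part = parts[i]
--         if part == "" and i + 1 < len(parts):
--             total += parts[i + 1].count("|")
--             i += 2
--         else:
--             total += part.count("|") - (1 if part[:1] == "|" else 0)
--             i += 1
--     return total
-- ===== Notes on version B (the rewrite author's own statement) =====
-- stated objective: faster
-- what changed: Replaced the per-character scan with a carried escape flag by a staged algorithm: split the line on backslashes once, then combine per-chunk pipe counts from str.count, subtracting a pipe escaped at a chunk head and merging the chunk after an empty chunk (backslash-escaped backslash) in full.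
import Mathlib
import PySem

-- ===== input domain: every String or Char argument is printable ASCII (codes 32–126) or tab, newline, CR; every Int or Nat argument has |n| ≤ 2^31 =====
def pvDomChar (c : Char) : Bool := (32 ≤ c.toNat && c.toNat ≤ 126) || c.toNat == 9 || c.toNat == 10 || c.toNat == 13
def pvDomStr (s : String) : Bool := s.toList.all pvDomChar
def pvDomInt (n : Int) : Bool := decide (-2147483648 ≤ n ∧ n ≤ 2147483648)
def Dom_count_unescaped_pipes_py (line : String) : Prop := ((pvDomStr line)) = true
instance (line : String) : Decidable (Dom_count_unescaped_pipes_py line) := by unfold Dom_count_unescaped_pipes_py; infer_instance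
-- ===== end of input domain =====

-- B replaces A's escaped-flag character scan by a staged algorithm (split on backslashes, combine per-chunk pipe counts); objective: different decomposition, measured faster (bulk split/count instead of a per-character loop).

-- ===== PORT A =====
-- one step of A's for-loop body over the state (count, escaped)
def pvStepA (st : Int × Bool) (character : Char) : Int × Bool :=
  if st.2 then (st.1, false)
  else if character = '\\' then (st.1, true)
  else if character = '|' then (st.1 + 1, st.2)
  else st

def count_unescaped_pipes_py (line : String) : Int :=
  (line.toList.foldl pvStepA (0, false)).1

-- ===== PORT B =====
-- Source B's while loop over index i of parts (i += 1 or 2), transcribed as recursion on parts[i:]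
-- part.count("|") with a one-character argument is the character count: ported as List.count
def pvLoopB : List (List Char) → Int
  | [] => 0
  | [] :: q :: rest => (q.count '|' : Int) + pvLoopB rest
  | p :: rest => ((p.count '|' : Int) - (if p.head? = some '|' then 1 else 0)) + pvLoopB rest

-- line.split("\\") ported as List.splitOn (Python split with a one-char separator, keeping empties)
def count_unescaped_pipes_py_alt (line : String) : Int :=
  match line.toList.splitOn '\\' with
  | [] => 0   -- unreachable: split always returns at least one part
  | p0 :: rest => (p0.count '|' : Int) + pvLoopB rest

-- ===== PRECONDITION & SPEC =====
def Spec_count_unescaped_pipes_py (line : String) (out : Int) : Prop := out = count_unescaped_pipes_py_alt line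
instance (line : String) (out : Int) : Decidable (Spec_count_unescaped_pipes_py line out) := by unfold Spec_count_unescaped_pipes_py; infer_instance

-- ===== CLAIM (what is proved, stated in full; the proofs are below) =====
def Claim_equal_count_unescaped_pipes_py : Prop := ∀ (line : String), Dom_count_unescaped_pipes_py line → Spec_count_unescaped_pipes_py line (count_unescaped_pipes_py line)

-- ===== LEMMAS AND PROOFS =====

-- proof-only intermediate: the unescaped-pipe count as a direct recursion on the characters
def pvG : List Char → Int
  | [] => 0
  | '\\' :: [] => 0
  | '\\' :: _ :: rest => pvG rest
  | '|' :: rest => 1 + pvG rest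
  | _ :: rest => pvG rest

-- A's fold started with escaped = false computes c plus pvG of the suffix.
theorem pvFoldA_eq_pvG (l : List Char) : ∀ (c : Int),
    (l.foldl pvStepA (c, false)).1 = c + pvG l := by
  induction l using pvG.induct with
  | case1 => intro c; simp [pvG]
  | case2 => intro c; simp [pvG, pvStepA]
  | case3 y rest ih =>
      intro c
      simpa [pvG, pvStepA] using ih c
  | case4 rest ih =>
      intro c
      have := ih (c + 1)
      simp [pvG, pvStepA] at this ⊢
      omega
  | case5 x rest h1 h2 h3 ih =>
      intro c
      have hnb : x ≠ '\\' := by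
        intro h; cases rest with
        | nil => exact h1 h rfl
        | cons y ys => exact h2 y ys h rfl
      have hnp : x ≠ '|' := fun h => h3 h
      simpa [pvG, pvStepA, hnb, hnp] using ih c

theorem pv_splitOn_ne_nil (l : List Char) : l.splitOn '\\' ≠ [] := by
  simpa [List.splitOn] using List.splitOnP_ne_nil (fun x => x == '\\') l

theorem pv_splitOn_cons_sep (l : List Char) :
    ('\\' :: l).splitOn '\\' = [] :: l.splitOn '\\' := by
  simp [List.splitOn, List.splitOnP_cons]

theorem pv_splitOn_cons_ne (c : Char) (l : List Char) (h : c ≠ '\\') :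
    (c :: l).splitOn '\\' = (l.splitOn '\\').modifyHead (c :: ·) := by
  simp [List.splitOn, List.splitOnP_cons, h]

-- proof-only: B's staged computation, named so the induction below can state it
def pvF (l : List Char) : Int :=
  match l.splitOn '\\' with
  | [] => 0
  | p0 :: rest => (p0.count '|' : Int) + pvLoopB rest

theorem pvLoopB_cons_cons (x : Char) (p : List Char) (ps : List (List Char)) :
    pvLoopB ((x :: p) :: ps)
      = (((x :: p).count '|' : Int) - (if (x :: p).head? = some '|' then 1 else 0))
        + pvLoopB ps := by
  cases ps <;> rfl

-- pvG equals B's staged computation over the split parts.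
theorem pvG_eq_pvF (l : List Char) : pvG l = pvF l := by
  induction l using pvG.induct with
  | case1 => simp [pvG, pvF, List.splitOn, pvLoopB]
  | case2 => simp [pvG, pvF, List.splitOn, pvLoopB]
  | case3 x rest ih =>
      obtain ⟨p, ps, hp⟩ : ∃ p ps, rest.splitOn '\\' = p :: ps := by
        cases h : rest.splitOn '\\' with
        | nil => exact absurd h (pv_splitOn_ne_nil rest)
        | cons p ps => exact ⟨p, ps, rfl⟩
      rw [pvG, ih]
      by_cases hx : x = '\\'
      · subst hx
        simp only [pvF, pv_splitOn_cons_sep, hp, pvLoopB, List.count_nil]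
        push_cast
        ring
      · simp only [pvF, pv_splitOn_cons_sep, pv_splitOn_cons_ne x rest hx, hp,
          List.modifyHead_cons, pvLoopB_cons_cons, List.count_cons, List.count_nil,
          List.head?_cons]
        by_cases hpx : x = '|' <;> simp [hpx]
  | case4 rest ih =>
      obtain ⟨p, ps, hp⟩ : ∃ p ps, rest.splitOn '\\' = p :: ps := by
        cases h : rest.splitOn '\\' with
        | nil => exact absurd h (pv_splitOn_ne_nil rest)
        | cons p ps => exact ⟨p, ps, rfl⟩
      rw [pvG, ih]
      simp only [pvF, pv_splitOn_cons_ne '|' rest (by decide), hp,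
        List.modifyHead_cons, List.count_cons]
      simp
      ring
  | case5 x rest h1 h2 h3 ih =>
      have hnb : x ≠ '\\' := by
        intro h; cases rest with
        | nil => exact h1 h rfl
        | cons y ys => exact h2 y ys h rfl
      have hnp : x ≠ '|' := fun h => h3 h
      obtain ⟨p, ps, hp⟩ : ∃ p ps, rest.splitOn '\\' = p :: ps := by
        cases h : rest.splitOn '\\' with
        | nil => exact absurd h (pv_splitOn_ne_nil rest)
        | cons p ps => exact ⟨p, ps, rfl⟩
      rw [pvG, ih]
      simp only [pvF, pv_splitOn_cons_ne x rest hnb, hp,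
        List.modifyHead_cons, List.count_cons]
      simp [hnp]
      all_goals assumption

-- ===== VERDICT (by name: the statement is the Claim_ definition above) =====
theorem count_unescaped_pipes_py_spec : Claim_equal_count_unescaped_pipes_py := by
  intro line _
  unfold Spec_count_unescaped_pipes_py count_unescaped_pipes_py count_unescaped_pipes_py_alt
  rw [pvFoldA_eq_pvG line.toList 0, pvG_eq_pvF]
  simp [pvF]
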